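-- pv_equiv track=rewrite | github.com/adamritter/lazyviewer | lazyviewer/picker_panel/controller.py | _first_display_index_for_source_line
-- ===== SOURCE A (Python) =====
-- def _line_has_newline_terminator(line: str) -> bool:
--     """Return whether a rendered display fragment ends a source line."""
--     return line.endswith("\n") or line.endswith("\r")
--
-- def _first_display_index_for_source_line(lines: list[str], source_line: int) -> int:
--     """Return the first rendered-line index corresponding to ``source_line``."""
--     if not lines:
--         return 0
--
--     target = max(1, source_line)
--     current_source = 1
--     for idx, line in enumerate(lines):
--         if current_source >= target:
--             return idx
--         if _line_has_newline_terminator(line):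
--             current_source += 1
--     return len(lines) - 1
-- ===== SOURCE B (Python) =====
-- def _line_has_newline_terminator(line: str) -> bool:
--     return line.endswith("\n") or line.endswith("\r")
--
-- def _first_display_index_for_source_line(lines: list[str], source_line: int) -> int:
--     """Boundary-table lookup: precompute where each new source line starts."""
--     if not lines:
--         return 0
--     target = max(1, source_line)
--     if target == 1:
--         return 0
--     starts = [idx + 1 for idx, line in enumerate(lines)
--               if _line_has_newline_terminator(line)]
--     k = target - 2
--     if k < len(starts):
--         return min(starts[k], len(lines) - 1)
--     return len(lines) - 1
-- ===== Notes on version B (the rewrite author's own statement) =====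
-- stated objective: alternative
-- what changed: Replaces A's count-until-target early-exit scan with a precomputed table of source-line boundary indices (one comprehension over enumerate) followed by a direct indexed lookup clamped to the last display index.
import Mathlib
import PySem

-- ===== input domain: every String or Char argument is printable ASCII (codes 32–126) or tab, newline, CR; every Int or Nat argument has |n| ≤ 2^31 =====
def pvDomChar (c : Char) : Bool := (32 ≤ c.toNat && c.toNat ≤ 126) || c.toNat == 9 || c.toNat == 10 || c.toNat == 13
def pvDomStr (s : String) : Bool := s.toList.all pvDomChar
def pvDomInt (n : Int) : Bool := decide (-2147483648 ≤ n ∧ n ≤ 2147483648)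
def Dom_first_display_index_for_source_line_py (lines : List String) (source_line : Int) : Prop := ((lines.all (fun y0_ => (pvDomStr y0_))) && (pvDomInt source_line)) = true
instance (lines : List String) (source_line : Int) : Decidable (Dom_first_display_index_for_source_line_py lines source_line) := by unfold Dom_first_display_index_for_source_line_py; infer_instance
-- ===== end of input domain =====

-- B replaces A's count-until-target scan by a precomputed boundary table with a direct
-- indexed lookup (objective: alternative decomposition; same asymptotic cost).
-- ===== PORT A =====
-- _line_has_newline_terminator
def pvTerm (line : String) : Bool :=
  PySem.Str.endswith line "\n" || PySem.Str.endswith line "\r"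

-- the for-loop of A: state (idx, current_source); total = len(lines) for the final fallback
def pvALoop (ls : List String) (target idx cur total : Int) : Int :=
  match ls with
  | [] => total - 1
  | l :: rest =>
    if cur ≥ target then idx
    else pvALoop rest target (idx + 1) (if pvTerm l then cur + 1 else cur) total

def first_display_index_for_source_line_py (lines : List String) (source_line : Int) : Int :=
  if lines = [] then 0
  else pvALoop lines (max 1 source_line) 0 1 (lines.length : Int)

-- ===== PORT B =====
def first_display_index_for_source_line_py_alt (lines : List String) (source_line : Int) : Int :=
  if lines = [] then 0
  else
    let target := max 1 source_line
    if target = 1 then 0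
    else
      let starts := (PySem.List.enumerate lines).filterMap
        (fun p => if pvTerm p.2 then some (p.1 + 1) else none)
      let k := target - 2
      if k < (starts.length : Int) then
        min ((PySem.List.pyGet? starts k).getD 0) ((lines.length : Int) - 1)
      else (lines.length : Int) - 1

-- ===== PRECONDITION & SPEC =====
def Spec_first_display_index_for_source_line_py (lines : List String) (source_line : Int) (out : Int) : Prop := out = first_display_index_for_source_line_py_alt lines source_line
instance (lines : List String) (source_line : Int) (out : Int) : Decidable (Spec_first_display_index_for_source_line_py lines source_line out) := by unfold Spec_first_display_index_for_source_line_py; infer_instance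

-- ===== CLAIM (what is proved, stated in full; the proofs are below) =====
def Claim_equal_first_display_index_for_source_line_py : Prop := ∀ (lines : List String) (source_line : Int), Dom_first_display_index_for_source_line_py lines source_line → Spec_first_display_index_for_source_line_py lines source_line (first_display_index_for_source_line_py lines source_line)

-- ===== LEMMAS AND PROOFS =====
-- the boundary table, written as a structural recursion with an index offset
def pvSAux (ls : List String) (c : Int) : List Int :=
  match ls with
  | [] => []
  | l :: rest => if pvTerm l then (c + 1) :: pvSAux rest (c + 1) else pvSAux rest (c + 1)

-- B's comprehension over enumerate equals the offset recursion
lemma pvStarts_eq_sAux : ∀ (ls : List String) (c : Int),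
    (PySem.List.enumerate ls c).filterMap (fun p => if pvTerm p.2 then some (p.1 + 1) else none)
      = pvSAux ls c := by
  intro ls
  induction ls with
  | nil => intro c; simp [pvSAux, PySem.List.enumerate_nil]
  | cons l rest ih =>
    intro c
    simp only [PySem.List.enumerate_cons, List.filterMap_cons, pvSAux]
    by_cases h : pvTerm l
    · simp [h, ih (c + 1)]
    · simp [h, ih (c + 1)]

-- loop invariant: A's scan from state (idx, cur) is a lookup at position target-cur-1
-- in the boundary table of the remaining fragment, clamped to the last display index
lemma pvALoop_eq : ∀ (ls : List String) (idx cur target : Int), cur < target →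
    pvALoop ls target idx cur (idx + (ls.length : Int)) =
      (if target - cur - 1 < ((pvSAux ls idx).length : Int)
       then min ((PySem.List.pyGet? (pvSAux ls idx) (target - cur - 1)).getD 0)
                (idx + (ls.length : Int) - 1)
       else idx + (ls.length : Int) - 1) := by
  intro ls
  induction ls with
  | nil =>
    intro idx cur target h
    simp only [pvALoop, pvSAux, List.length_nil]
    rw [if_neg (by push_cast; omega)]
  | cons l rest ih =>
    intro idx cur target h
    have hstep : pvALoop (l :: rest) target idx cur (idx + ((l :: rest).length : Int))
        = pvALoop rest target (idx + 1) (if pvTerm l then cur + 1 else cur)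
            (idx + ((l :: rest).length : Int)) := by
      simp only [pvALoop]; rw [if_neg (by omega)]
    have hlen : idx + (((l :: rest).length : Int)) = (idx + 1) + (rest.length : Int) := by
      simp; omega
    by_cases ht : pvTerm l
    · have hs : pvSAux (l :: rest) idx = (idx + 1) :: pvSAux rest (idx + 1) := by
        simp [pvSAux, ht]
      by_cases h2 : cur + 1 < target
      · -- still below the target: recurse; the head boundary shifts the lookup by one
        rw [hstep, if_pos ht, hlen, ih (idx + 1) (cur + 1) target h2, hs]
        simp only [List.length_cons]
        rw [PySem.List.pyGet?_of_nonneg (pvSAux rest (idx + 1)) (show (0:Int) ≤ target - (cur + 1) - 1 by omega),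
            PySem.List.pyGet?_of_nonneg ((idx + 1) :: pvSAux rest (idx + 1)) (show (0:Int) ≤ target - cur - 1 by omega),
            show (target - cur - 1).toNat = (target - (cur + 1) - 1).toNat + 1 from by omega,
            List.getElem?_cons_succ]
        push_cast
        split_ifs with hA hB
        all_goals omega
      · -- the head line completes the target source line: next index (clamped) is the answer
        have hk0 : target - cur - 1 = 0 := by omega
        rw [hstep, if_pos ht, hs, hk0, PySem.List.pyGet?_zero_cons]
        simp only [Option.getD_some, List.length_cons]
        rw [if_pos (by push_cast; omega)]
        cases rest with
        | nil =>
          simp only [pvALoop, List.length_nil]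
          rw [min_def]
          split_ifs <;> push_cast <;> omega
        | cons r rest' =>
          simp only [pvALoop]
          rw [if_pos (by omega), min_def]
          split_ifs with hm
          all_goals simp only [List.length_cons] at *
          all_goals push_cast at *
          all_goals omega
    · -- no boundary at the head: same lookup, one step further
      have hs : pvSAux (l :: rest) idx = pvSAux rest (idx + 1) := by simp [pvSAux, ht]
      rw [hstep, if_neg ht, hlen, ih (idx + 1) cur target h, hs]

-- ===== VERDICT (by name: the statement is the Claim_ definition above) =====
theorem first_display_index_for_source_line_py_spec : Claim_equal_first_display_index_for_source_line_py := by
  intro lines source_line _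
  unfold Spec_first_display_index_for_source_line_py first_display_index_for_source_line_py
    first_display_index_for_source_line_py_alt
  by_cases hnil : lines = []
  · simp [hnil]
  · rw [if_neg hnil, if_neg hnil]
    set target := max 1 source_line with htarget
    have ht1 : 1 ≤ target := le_max_left _ _
    by_cases h1 : target = 1
    · -- target 1: A returns index 0 immediately, B returns 0
      cases lines with
      | nil => exact absurd rfl hnil
      | cons l rest => simp [pvALoop, h1]
    · -- target ≥ 2: the loop is the boundary-table lookup at target-2
      rw [if_neg h1]
      have h2 : 1 < target := by omega
      have := pvALoop_eq lines 0 1 target h2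
      rw [zero_add] at this
      rw [this, pvStarts_eq_sAux lines 0]
      have hk : target - 1 - 1 = target - 2 := by omega
      rw [hk]
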